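-- pv_equiv track=rewrite | github.com/nillyse/SEM4_TD | lab10/lab10/lab10.py | hamming_coding_secdec
-- ===== SOURCE A (Python) =====
-- def hamming_coding_secdec(bits):
--     p = []
--     for i in range(0, len(bits), 4):
--         p.append((bits[i] + bits[i+1] + bits[i+3])%2)
--         p.append((bits[i] + bits[i+2] + bits[i+3])%2)
--         p.append(bits[i])
--         p.append((bits[i+1] + bits[i+2] + bits[i+3])%2)
--         p.append(bits[i+1])
--         p.append(bits[i+2])
--         p.append(bits[i+3])
--         parity_bit = sum(bits[i:i+3])%2
--         p.append(parity_bit)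
--     return p
-- ===== SOURCE B (Python) =====
-- # Staged-passes re-implementation: extract the four data columns across all
-- # blocks first, compute each parity STREAM as its own whole-list pass over
-- # zipped columns, then interleave the eight streams positionally with zip.
-- def hamming_coding_secdec(bits):
--     n = len(bits)
--     d0 = [bits[i] for i in range(0, n, 4)]
--     d1 = [bits[i + 1] for i in range(0, n, 4)]
--     d2 = [bits[i + 2] for i in range(0, n, 4)]
--     d3 = [bits[i + 3] for i in range(0, n, 4)]
--     p1 = [(a + b + d) % 2 for a, b, d in zip(d0, d1, d3)]
--     p2 = [(a + c + d) % 2 for a, c, d in zip(d0, d2, d3)]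
--     p3 = [(b + c + d) % 2 for b, c, d in zip(d1, d2, d3)]
--     sec = [(a + b + c) % 2 for a, b, c in zip(d0, d1, d2)]
--     return [x for t in zip(p1, p2, d0, p3, d1, d2, d3, sec) for x in t]
-- ===== Notes on version B (the rewrite author's own statement) =====
-- stated objective: alternative
-- what changed: Instead of A's single pass emitting eight hard-coded values per 4-bit block, B works column-wise in staged passes: it extracts the four data columns across all blocks, computes each parity bit as its own whole-list stream over zipped columns, and finally interleaves the eight streams with zip.
import Mathlib
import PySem

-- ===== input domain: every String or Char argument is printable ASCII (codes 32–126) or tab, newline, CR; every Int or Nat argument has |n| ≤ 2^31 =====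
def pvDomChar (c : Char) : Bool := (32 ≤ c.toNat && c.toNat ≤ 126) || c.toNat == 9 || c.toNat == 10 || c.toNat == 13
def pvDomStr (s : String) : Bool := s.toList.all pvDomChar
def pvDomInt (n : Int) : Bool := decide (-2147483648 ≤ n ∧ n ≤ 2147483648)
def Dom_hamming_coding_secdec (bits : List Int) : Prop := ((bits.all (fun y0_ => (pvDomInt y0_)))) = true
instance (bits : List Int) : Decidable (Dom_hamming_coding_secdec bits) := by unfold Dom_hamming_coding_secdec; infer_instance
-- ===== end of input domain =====

-- B re-derives the code column-wise in staged passes (data columns, then per-parity streams, then a zip interleave) instead of A's single pass emitting eight values per block; alternative decomposition, same cost.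


-- ===== PORT A =====
def hamming_coding_secdec (bits : List Int) : List Int :=
  (PySem.List.pyRange 0 (PySem.List.len bits) 4).foldl (fun p i =>
    let p := p ++ [PySem.Int.mod (PySem.List.pyGetD bits i 0 + PySem.List.pyGetD bits (i+1) 0 + PySem.List.pyGetD bits (i+3) 0) 2]
    let p := p ++ [PySem.Int.mod (PySem.List.pyGetD bits i 0 + PySem.List.pyGetD bits (i+2) 0 + PySem.List.pyGetD bits (i+3) 0) 2]
    let p := p ++ [PySem.List.pyGetD bits i 0]
    let p := p ++ [PySem.Int.mod (PySem.List.pyGetD bits (i+1) 0 + PySem.List.pyGetD bits (i+2) 0 + PySem.List.pyGetD bits (i+3) 0) 2]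
    let p := p ++ [PySem.List.pyGetD bits (i+1) 0]
    let p := p ++ [PySem.List.pyGetD bits (i+2) 0]
    let p := p ++ [PySem.List.pyGetD bits (i+3) 0]
    let parity_bit := PySem.Int.mod (PySem.List.slice bits (some i) (some (i+3))).sum 2
    p ++ [parity_bit]) []

-- ===== PORT B =====
-- bits[i+k] in the column comprehensions is always in range on Pre_ (len % 4 = 0),
-- so pyGetD with default 0 is exact there.
def hamming_coding_secdec_alt (bits : List Int) : List Int :=
  let n := PySem.List.len bits
  let d0 := (PySem.List.pyRange 0 n 4).map (fun i => PySem.List.pyGetD bits i 0)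
  let d1 := (PySem.List.pyRange 0 n 4).map (fun i => PySem.List.pyGetD bits (i+1) 0)
  let d2 := (PySem.List.pyRange 0 n 4).map (fun i => PySem.List.pyGetD bits (i+2) 0)
  let d3 := (PySem.List.pyRange 0 n 4).map (fun i => PySem.List.pyGetD bits (i+3) 0)
  let p1 := (d0.zip (d1.zip d3)).map (fun t => PySem.Int.mod (t.1 + t.2.1 + t.2.2) 2)
  let p2 := (d0.zip (d2.zip d3)).map (fun t => PySem.Int.mod (t.1 + t.2.1 + t.2.2) 2)
  let p3 := (d1.zip (d2.zip d3)).map (fun t => PySem.Int.mod (t.1 + t.2.1 + t.2.2) 2)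
  let sec := (d0.zip (d1.zip d2)).map (fun t => PySem.Int.mod (t.1 + t.2.1 + t.2.2) 2)
  (p1.zip (p2.zip (d0.zip (p3.zip (d1.zip (d2.zip (d3.zip sec))))))).flatMap
    (fun t => [t.1, t.2.1, t.2.2.1, t.2.2.2.1, t.2.2.2.2.1, t.2.2.2.2.2.1, t.2.2.2.2.2.2.1, t.2.2.2.2.2.2.2])

-- ===== PRECONDITION & SPEC =====
-- A indexes bits[i+1..i+3] for every block start i, so it raises IndexError unless the length is a multiple of 4.
def Pre_hamming_coding_secdec (bits : List Int) : Prop := bits.length % 4 = 0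
instance (bits : List Int) : Decidable (Pre_hamming_coding_secdec bits) := by unfold Pre_hamming_coding_secdec; infer_instance
def pvWitness_hamming_coding_secdec : List Int := [1, 0, 1, 1]

def Spec_hamming_coding_secdec (bits : List Int) (out : List Int) : Prop := out = hamming_coding_secdec_alt bits
instance (bits : List Int) (out : List Int) : Decidable (Spec_hamming_coding_secdec bits out) := by unfold Spec_hamming_coding_secdec; infer_instance

-- ===== CLAIM =====
def Claim_equal_hamming_coding_secdec : Prop := ∀ (bits : List Int), Dom_hamming_coding_secdec bits → Pre_hamming_coding_secdec bits → Spec_hamming_coding_secdec bits (hamming_coding_secdec bits)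

-- ===== LEMMAS AND PROOFS =====

-- A's per-block emission, as a function (proof helper only)
def pvBlockA (bits : List Int) (i : Int) : List Int :=
  [PySem.Int.mod (PySem.List.pyGetD bits i 0 + PySem.List.pyGetD bits (i+1) 0 + PySem.List.pyGetD bits (i+3) 0) 2,
   PySem.Int.mod (PySem.List.pyGetD bits i 0 + PySem.List.pyGetD bits (i+2) 0 + PySem.List.pyGetD bits (i+3) 0) 2,
   PySem.List.pyGetD bits i 0,
   PySem.Int.mod (PySem.List.pyGetD bits (i+1) 0 + PySem.List.pyGetD bits (i+2) 0 + PySem.List.pyGetD bits (i+3) 0) 2,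
   PySem.List.pyGetD bits (i+1) 0,
   PySem.List.pyGetD bits (i+2) 0,
   PySem.List.pyGetD bits (i+3) 0,
   PySem.Int.mod (PySem.List.slice bits (some i) (some (i+3))).sum 2]

theorem pv_A_eq_flatMap (bits : List Int) :
    hamming_coding_secdec bits = (PySem.List.pyRange 0 (PySem.List.len bits) 4).flatMap (pvBlockA bits) := by
  unfold hamming_coding_secdec
  have h : ∀ (p : List Int) (i : Int), i ∈ PySem.List.pyRange 0 (PySem.List.len bits) 4 →
      (let p := p ++ [PySem.Int.mod (PySem.List.pyGetD bits i 0 + PySem.List.pyGetD bits (i+1) 0 + PySem.List.pyGetD bits (i+3) 0) 2]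
       let p := p ++ [PySem.Int.mod (PySem.List.pyGetD bits i 0 + PySem.List.pyGetD bits (i+2) 0 + PySem.List.pyGetD bits (i+3) 0) 2]
       let p := p ++ [PySem.List.pyGetD bits i 0]
       let p := p ++ [PySem.Int.mod (PySem.List.pyGetD bits (i+1) 0 + PySem.List.pyGetD bits (i+2) 0 + PySem.List.pyGetD bits (i+3) 0) 2]
       let p := p ++ [PySem.List.pyGetD bits (i+1) 0]
       let p := p ++ [PySem.List.pyGetD bits (i+2) 0]
       let p := p ++ [PySem.List.pyGetD bits (i+3) 0]
       let parity_bit := PySem.Int.mod (PySem.List.slice bits (some i) (some (i+3))).sum 2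
       p ++ [parity_bit]) = p ++ pvBlockA bits i := by
    intro p i _
    simp [pvBlockA, List.append_assoc]
  rw [PySem.List.foldl_congr_mem _ _ (fun p i => p ++ pvBlockA bits i) _ h]
  rw [PySem.List.foldl_append_eq_flatMap]
  simp

theorem pv_range4_cons (n : Int) (h : 0 ≤ n) :
    PySem.List.pyRange 0 (n+4) 4 = 0 :: (PySem.List.pyRange 0 n 4).map (· + 4) := by
  rw [PySem.List.pyRange_of_pos _ _ (by norm_num), PySem.List.pyRange_of_pos _ _ (by norm_num)]
  have hc : (if (0:Int) < n + 4 then ((n + 4 - 0 + 4 - 1) / 4).toNat else 0)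
      = (if (0:Int) < n then ((n - 0 + 4 - 1) / 4).toNat else 0) + 1 := by
    split_ifs <;> omega
  rw [hc, List.range_succ_eq_map]
  simp [List.map_map, Function.comp]
  intro k _
  ring

theorem pv_getD_cons4 (a b c e : Int) (rest : List Int) (i : Int) (h : 0 ≤ i) (d : Int) :
    PySem.List.pyGetD (a::b::c::e::rest) (i+4) d = PySem.List.pyGetD rest i d := by
  by_cases hi : i < (rest.length : Int)
  · rw [PySem.List.pyGetD_eq_getElem _ d h hi,
        PySem.List.pyGetD_eq_getElem (a::b::c::e::rest) d (by omega) (by simp; omega)]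
    have h4 : (i+4).toNat = i.toNat + 4 := by omega
    simp [h4, List.getElem_cons_succ]
  · have h1 : ¬ (i + 4 < ((a::b::c::e::rest).length : Int)) := by simp; omega
    have h2 : ¬ (i < (rest.length : Int)) := hi
    simp only [PySem.List.pyGetD, PySem.List.pyGet?, PySem.List.pyIdx?]
    rw [if_pos (by omega : (0:Int) ≤ i + 4), if_neg h1, if_pos h, if_neg h2]
    rfl

theorem pv_slice3_cons4 (a b c e : Int) (rest : List Int) (i : Int) (h : 0 ≤ i) :
    PySem.List.slice (a::b::c::e::rest) (some (i+4)) (some (i+4+3))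
      = PySem.List.slice rest (some i) (some (i+3)) := by
  rw [PySem.List.slice_toNat _ (by omega) (by omega), PySem.List.slice_toNat _ (by omega) (by omega)]
  have h1 : (i+4).toNat = i.toNat + 4 := by omega
  have h2 : (i+4+3).toNat = i.toNat + 7 := by omega
  have h3 : (i+3).toNat = i.toNat + 3 := by omega
  simp [h1, h2, h3, List.drop_succ_cons]

theorem pv_blockA_cons4 (a b c e : Int) (rest : List Int) (i : Int) (h : 0 ≤ i) :
    pvBlockA (a::b::c::e::rest) (i+4) = pvBlockA rest i := by
  unfold pvBlockA
  have g0 := pv_getD_cons4 a b c e rest i h 0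
  have g1 : PySem.List.pyGetD (a::b::c::e::rest) (i+4+1) 0 = PySem.List.pyGetD rest (i+1) 0 := by
    have := pv_getD_cons4 a b c e rest (i+1) (by omega) 0
    rw [← this]; ring_nf
  have g2 : PySem.List.pyGetD (a::b::c::e::rest) (i+4+2) 0 = PySem.List.pyGetD rest (i+2) 0 := by
    have := pv_getD_cons4 a b c e rest (i+2) (by omega) 0
    rw [← this]; ring_nf
  have g3 : PySem.List.pyGetD (a::b::c::e::rest) (i+4+3) 0 = PySem.List.pyGetD rest (i+3) 0 := by
    have := pv_getD_cons4 a b c e rest (i+3) (by omega) 0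
    rw [← this]; ring_nf
  rw [g0, g1, g2, g3, pv_slice3_cons4 a b c e rest i h]

theorem pv_getD_head (a b c e : Int) (rest : List Int) (k : Nat) (hk : k < 4) (d : Int) :
    PySem.List.pyGetD (a::b::c::e::rest) (k : Int) d = [a,b,c,e][k] := by
  rw [PySem.List.pyGetD_eq_getElem _ d (by omega) (by simp; omega)]
  interval_cases k <;> simp

theorem pv_A_cons (a b c e : Int) (rest : List Int) :
    hamming_coding_secdec (a::b::c::e::rest) =
      [PySem.Int.mod (a + b + e) 2, PySem.Int.mod (a + c + e) 2, a,
       PySem.Int.mod (b + c + e) 2, b, c, e, PySem.Int.mod (a + b + c) 2]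
      ++ hamming_coding_secdec rest := by
  rw [pv_A_eq_flatMap, pv_A_eq_flatMap]
  have hlen : PySem.List.len (a::b::c::e::rest) = (rest.length : Int) + 4 := by
    simp [PySem.List.len_eq]; omega
  rw [hlen, pv_range4_cons _ (by positivity), List.flatMap_cons]
  congr 1
  · have g0 := pv_getD_head a b c e rest 0 (by omega) 0
    have g1 := pv_getD_head a b c e rest 1 (by omega) 0
    have g2 := pv_getD_head a b c e rest 2 (by omega) 0
    have g3 := pv_getD_head a b c e rest 3 (by omega) 0
    simp at g0 g1 g2 g3
    have hs : PySem.List.slice (a::b::c::e::rest) (some 0) (some 3) = [a, b, c] := by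
      rw [PySem.List.slice_toNat _ (by omega) (by omega)]; rfl
    unfold pvBlockA
    norm_num [g0, g1, g2, g3, hs]
    ring_nf
  · rw [PySem.List.len_eq, List.flatMap_map]
    apply List.flatMap_congr
    intro i hi
    have h0 : 0 ≤ i := ((PySem.List.mem_pyRange_iff_of_pos (by norm_num) i).1 hi).1
    exact pv_blockA_cons4 a b c e rest i h0

theorem pv_tail_map (rest : List Int) (f g : Int → Int) (hfg : ∀ i, 0 ≤ i → f (i + 4) = g i) :
    ((PySem.List.pyRange 0 (PySem.List.len rest) 4).map (· + 4)).map f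
      = (PySem.List.pyRange 0 (PySem.List.len rest) 4).map g := by
  rw [List.map_map]
  apply List.map_congr_left
  intro i hi
  have h0 : 0 ≤ i := ((PySem.List.mem_pyRange_iff_of_pos (by norm_num) i).1 hi).1
  exact hfg i h0

theorem pv_B_cons (a b c e : Int) (rest : List Int) :
    hamming_coding_secdec_alt (a::b::c::e::rest) =
      [PySem.Int.mod (a + b + e) 2, PySem.Int.mod (a + c + e) 2, a,
       PySem.Int.mod (b + c + e) 2, b, c, e, PySem.Int.mod (a + b + c) 2]
      ++ hamming_coding_secdec_alt rest := by
  have hr : PySem.List.pyRange 0 (PySem.List.len (a::b::c::e::rest)) 4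
      = 0 :: (PySem.List.pyRange 0 (PySem.List.len rest) 4).map (· + 4) := by
    have h1 : PySem.List.len (a::b::c::e::rest) = (rest.length : Int) + 4 := by
      simp [PySem.List.len_eq]; omega
    rw [h1, pv_range4_cons _ (by positivity), PySem.List.len_eq]
  have g0 : PySem.List.pyGetD (a::b::c::e::rest) (0:Int) 0 = a := by
    rw [PySem.List.pyGetD_eq_getElem _ 0 (by omega) (by simp; omega)]; rfl
  have g1 : PySem.List.pyGetD (a::b::c::e::rest) (1:Int) 0 = b := by
    rw [PySem.List.pyGetD_eq_getElem _ 0 (by omega) (by simp; omega)]; rfl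
  have g2 : PySem.List.pyGetD (a::b::c::e::rest) (2:Int) 0 = c := by
    rw [PySem.List.pyGetD_eq_getElem _ 0 (by omega) (by simp; omega)]; rfl
  have g3 : PySem.List.pyGetD (a::b::c::e::rest) (3:Int) 0 = e := by
    rw [PySem.List.pyGetD_eq_getElem _ 0 (by omega) (by simp; omega)]; rfl
  have t0 := pv_tail_map rest (fun i => PySem.List.pyGetD (a::b::c::e::rest) i 0)
      (fun i => PySem.List.pyGetD rest i 0)
      (fun i hi => pv_getD_cons4 a b c e rest i hi 0)
  have t1 := pv_tail_map rest (fun i => PySem.List.pyGetD (a::b::c::e::rest) (i+1) 0)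
      (fun i => PySem.List.pyGetD rest (i+1) 0)
      (fun i hi => by
        have h := pv_getD_cons4 a b c e rest (i+1) (by omega) 0
        simpa [show i + 4 + 1 = i + 1 + 4 by ring] using h)
  have t2 := pv_tail_map rest (fun i => PySem.List.pyGetD (a::b::c::e::rest) (i+2) 0)
      (fun i => PySem.List.pyGetD rest (i+2) 0)
      (fun i hi => by
        have h := pv_getD_cons4 a b c e rest (i+2) (by omega) 0
        simpa [show i + 4 + 2 = i + 2 + 4 by ring] using h)
  have t3 := pv_tail_map rest (fun i => PySem.List.pyGetD (a::b::c::e::rest) (i+3) 0)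
      (fun i => PySem.List.pyGetD rest (i+3) 0)
      (fun i hi => by
        have h := pv_getD_cons4 a b c e rest (i+3) (by omega) 0
        simpa [show i + 4 + 3 = i + 3 + 4 by ring] using h)
  simp only [hamming_coding_secdec_alt, hr, List.map_cons, t0, t1, t2, t3,
    List.zip_cons_cons, List.flatMap_cons]
  simp [g0, g1, g2, g3]

theorem pv_main : ∀ (n : Nat), ∀ (bits : List Int), bits.length = n → n % 4 = 0 →
    hamming_coding_secdec bits = hamming_coding_secdec_alt bits := by
  intro n
  induction n using Nat.strong_induction_on with
  | _ n ih =>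
    intro bits hlen h4
    rcases bits with _ | ⟨a, _ | ⟨b, _ | ⟨c, _ | ⟨e, rest⟩⟩⟩⟩
    · decide
    · simp at hlen; omega
    · simp at hlen; omega
    · simp at hlen; omega
    · have hln : rest.length + 4 = n := by simpa using hlen
      rw [pv_A_cons, pv_B_cons, ih rest.length (by omega) rest rfl (by omega)]

-- ===== VERDICT =====
theorem hamming_coding_secdec_spec : Claim_equal_hamming_coding_secdec := by
  intro bits _ hpre
  exact pv_main bits.length bits rfl hpre
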